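-- pv_equiv track=rewrite | github.com/betaveros/paradoc | paradoc/docgen.py | mangle_to_id
-- ===== SOURCE A (Python) =====
-- from typing import List, Tuple, Dict
-- import string, sys
--
-- safe_id_chars = string.ascii_letters + string.digits
--
-- def mangle_to_id(id_prefix: str, name: str) -> str:
--     acc: List[str] = [id_prefix, '_']
--     for c in name:
--         if c in safe_id_chars:
--             acc.append(c)
--         elif c == '_':
--             acc.append('__')
--         else:
--             acc.append('_' + hex(ord(c))[2:] + '_')
--     ret = ''.join(acc)
--     if ret.endswith('_'): ret = ret[:-1]
--     return ret
-- ===== SOURCE B (Python) =====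
-- import re
--
-- def mangle_to_id(id_prefix: str, name: str) -> str:
--     def repl(m):
--         c = m.group(0)
--         return '__' if c == '_' else '_' + hex(ord(c))[2:] + '_'
--     ret = id_prefix + '_' + re.sub(r'[^a-zA-Z0-9]', repl, name)
--     if ret.endswith('_'):
--         ret = ret[:-1]
--     return ret
-- ===== Notes on version B (the rewrite author's own statement) =====
-- stated objective: idiomatic
-- what changed: Replaces the explicit per-character branch loop with list accumulator by a single re.sub over the unsafe-character class with a replacement callback, concatenating the prefix directly.
import Mathlib
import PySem

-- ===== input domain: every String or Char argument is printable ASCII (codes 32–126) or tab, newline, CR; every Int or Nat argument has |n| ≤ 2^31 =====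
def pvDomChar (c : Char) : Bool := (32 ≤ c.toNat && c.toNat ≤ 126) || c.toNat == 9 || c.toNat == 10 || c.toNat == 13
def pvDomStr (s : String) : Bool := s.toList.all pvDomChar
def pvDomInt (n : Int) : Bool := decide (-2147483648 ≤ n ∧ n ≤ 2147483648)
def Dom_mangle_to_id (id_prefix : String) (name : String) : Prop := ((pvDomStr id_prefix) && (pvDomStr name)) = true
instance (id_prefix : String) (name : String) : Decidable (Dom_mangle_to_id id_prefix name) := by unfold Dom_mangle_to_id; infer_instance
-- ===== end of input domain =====

-- B replaces A's explicit per-character branch loop (list accumulator + join) by a single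
-- regex substitution over the unsafe-character class with a replacement callback (idiomatic).


-- ===== PORT A =====
-- c in safe_id_chars  (string.ascii_letters + string.digits)
def pvSafeChar (c : Char) : Bool :=
  ('a' ≤ c && c ≤ 'z') || ('A' ≤ c && c ≤ 'Z') || ('0' ≤ c && c ≤ '9')

-- hex(ord(c))[2:] : lowercase hex digits of the codepoint (exact: ord(c) ≥ 0, so no sign/prefix)
def pvHex (n : Nat) : List Char := Nat.toDigits 16 n

def mangle_to_id (id_prefix : String) (name : String) : String :=
  let acc : List String := name.toList.foldl (fun acc c =>
    if pvSafeChar c then acc ++ [String.ofList [c]]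
    else if c = '_' then acc ++ ["__"]
    else acc ++ [String.ofList ('_' :: (pvHex c.toNat ++ ['_']))]) [id_prefix, "_"]
  let ret := PySem.Str.join "" acc
  if PySem.Str.endswith ret "_" then PySem.Str.slice ret none (some (-1)) else ret

-- ===== PORT B =====
-- the re.sub replacement callback: c is the single character matched by [^a-zA-Z0-9]
def pvRepl (c : Char) : String :=
  if c = '_' then "__" else String.ofList ('_' :: (pvHex c.toNat ++ ['_']))

-- re.sub(r'[^a-zA-Z0-9]', repl, name): the pattern matches exactly one character, so the
-- substitution replaces every char of the class by repl and keeps the rest (exact port)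
def pvReSub (name : String) : String :=
  PySem.Str.join "" (name.toList.map (fun c => if !pvSafeChar c then pvRepl c else String.ofList [c]))

def mangle_to_id_alt (id_prefix : String) (name : String) : String :=
  let ret := id_prefix ++ "_" ++ pvReSub name
  if PySem.Str.endswith ret "_" then PySem.Str.slice ret none (some (-1)) else ret

-- ===== PRECONDITION & SPEC =====
def Spec_mangle_to_id (id_prefix : String) (name : String) (out : String) : Prop := out = mangle_to_id_alt id_prefix name
instance (id_prefix : String) (name : String) (out : String) : Decidable (Spec_mangle_to_id id_prefix name out) := by unfold Spec_mangle_to_id; infer_instance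

-- ===== CLAIM (what is proved, stated in full; the proofs are below) =====
def Claim_equal_mangle_to_id : Prop := ∀ (id_prefix : String) (name : String), Dom_mangle_to_id id_prefix name → Spec_mangle_to_id id_prefix name (mangle_to_id id_prefix name)

-- ===== LEMMAS AND PROOFS =====

-- ''.join is flatten
theorem join_nil_flatten (xss : List (List Char)) :
    PySem.Chars.join [] xss = xss.flatten := by
  induction xss with
  | nil => simp [PySem.Chars.join, List.intercalate]
  | cons x xs ih =>
    cases xs with
    | nil => simp [PySem.Chars.join_singleton]
    | cons y ys => simp [PySem.Chars.join_cons_cons, ih]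

-- A's per-character fragment and B's per-character substitution agree
theorem piece_eq (c : Char) :
    (if pvSafeChar c then String.ofList [c]
     else if c = '_' then "__" else String.ofList ('_' :: (pvHex c.toNat ++ ['_'])))
    = (if !pvSafeChar c then pvRepl c else String.ofList [c]) := by
  by_cases h : pvSafeChar c = true <;> simp [h, pvRepl]

-- A's accumulator loop is the initial list followed by one fragment per character
theorem foldl_acc (l : List Char) (acc : List String) :
    l.foldl (fun acc c =>
      if pvSafeChar c then acc ++ [String.ofList [c]]
      else if c = '_' then acc ++ ["__"]
      else acc ++ [String.ofList ('_' :: (pvHex c.toNat ++ ['_']))]) acc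
    = acc ++ l.map (fun c =>
        if pvSafeChar c then String.ofList [c]
        else if c = '_' then "__" else String.ofList ('_' :: (pvHex c.toNat ++ ['_']))) := by
  induction l generalizing acc with
  | nil => simp
  | cons c l ih =>
    simp only [List.foldl_cons, List.map_cons, ih]
    by_cases h : pvSafeChar c = true
    · simp [h]
    · by_cases h2 : c = '_' <;> simp [h, h2, show pvSafeChar '_' = false from by decide]

-- the two pre-strip strings coincide
theorem mangle_ret_eq (p n : String) :
    PySem.Str.join "" (n.toList.foldl (fun acc c =>
      if pvSafeChar c then acc ++ [String.ofList [c]]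
      else if c = '_' then acc ++ ["__"]
      else acc ++ [String.ofList ('_' :: (pvHex c.toNat ++ ['_']))]) [p, "_"])
    = p ++ "_" ++ pvReSub n := by
  apply String.toList_inj.mp
  rw [foldl_acc]
  simp only [pvReSub, PySem.Str.toList_join, List.map_append, List.map_map, String.toList_append,
    show "".toList = ([] : List Char) from rfl]
  rw [join_nil_flatten, join_nil_flatten]
  simp [piece_eq]

-- ===== VERDICT (by name: the statement is the Claim_ definition above) =====
theorem mangle_to_id_spec : Claim_equal_mangle_to_id := by
  intro p n _
  unfold Spec_mangle_to_id
  simp only [mangle_to_id, mangle_to_id_alt, mangle_ret_eq]
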